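-- pv_equiv track=rewrite | github.com/organvm-i-theoria/nexus--babel-alexandria | src/nexus_babel/services/text_utils.py | syllabify
-- ===== SOURCE A (Python) =====
-- VOWELS = set("aeiouyAEIOUY")
--
-- def syllabify(word: str) -> list[str]:
--     """Deterministic heuristic syllable splitting using consonant-vowel patterns.
--
--     Splits at consonant boundaries between vowel groups. For example:
--     "hello" → ["hel", "lo"], "beautiful" → ["beau", "ti", "ful"]
--     """
--     if len(word) <= 2:
--         return [word] if word else []
--
--     syllables: list[str] = []
--     current = ""
--
--     i = 0
--     while i < len(word):
--         ch = word[i]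
--         current += ch
--
--         if ch.lower() in VOWELS:
--             # Consume consecutive vowels into this syllable
--             while i + 1 < len(word) and word[i + 1].lower() in VOWELS:
--                 i += 1
--                 current += word[i]
--
--             # Look ahead for consonant cluster followed by vowel
--             if i + 1 < len(word):
--                 # Count consonants ahead
--                 cons_start = i + 1
--                 cons_end = cons_start
--                 while cons_end < len(word) and word[cons_end].lower() not in VOWELS:
--                     cons_end += 1
--
--                 num_cons = cons_end - cons_start
--                 if cons_end < len(word) and num_cons > 0:
--                     # There's a vowel after the consonants — split
--                     # Keep last consonant(s) for next syllable if multiple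
--                     if num_cons >= 2:
--                         # Add all but last consonant to current
--                         current += word[cons_start:cons_end - 1]
--                         i = cons_end - 2
--                     syllables.append(current)
--                     current = ""
--                 # else: remaining chars are all consonants — they'll be added to current
--
--         i += 1
--
--     if current:
--         if syllables and len(current) == 1 and current.lower() not in VOWELS:
--             syllables[-1] += current
--         else:
--             syllables.append(current)
--
--     return syllables if syllables else [word]
-- ===== SOURCE B (Python) =====
-- VOWELS = set("aeiouyAEIOUY")
--
-- def syllabify(word: str) -> list[str]:
--     """Run-based re-implementation: segment the word into maximal same-class
--     (vowel/consonant) runs, then assemble syllables run by run."""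
--     if len(word) <= 2:
--         return [word] if word else []
--
--     # One scan: maximal runs of same vowel-class characters.
--     runs: list[tuple[bool, str]] = []
--     i = 0
--     n = len(word)
--     while i < n:
--         v = word[i].lower() in VOWELS
--         j = i
--         while j < n and (word[j].lower() in VOWELS) == v:
--             j += 1
--         runs.append((v, word[i:j]))
--         i = j
--
--     syllables: list[str] = []
--     cur = ""
--     m = len(runs)
--     for k, (v, txt) in enumerate(runs):
--         if v:
--             cur += txt
--         elif k + 1 < m:
--             if k > 0:
--                 # consonant run between vowels: last consonant opens the next syllable
--                 syllables.append(cur + txt[:-1])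
--                 cur = txt[-1]
--             else:
--                 cur = txt  # leading consonants
--         else:
--             cur += txt  # trailing consonants
--
--     if cur:
--         if syllables and len(cur) == 1 and cur.lower() not in VOWELS:
--             syllables[-1] += cur
--         else:
--             syllables.append(cur)
--
--     return syllables if syllables else [word]
-- ===== Notes on version B (the rewrite author's own statement) =====
-- stated objective: alternative
-- what changed: B first segments the word into maximal vowel/consonant runs in one scan and then assembles syllables run by run (last consonant of each inter-vowel run opens the next syllable), instead of A's index-jumping character loop with inner vowel-consuming and consonant-lookahead while loops.
import Mathlib
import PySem

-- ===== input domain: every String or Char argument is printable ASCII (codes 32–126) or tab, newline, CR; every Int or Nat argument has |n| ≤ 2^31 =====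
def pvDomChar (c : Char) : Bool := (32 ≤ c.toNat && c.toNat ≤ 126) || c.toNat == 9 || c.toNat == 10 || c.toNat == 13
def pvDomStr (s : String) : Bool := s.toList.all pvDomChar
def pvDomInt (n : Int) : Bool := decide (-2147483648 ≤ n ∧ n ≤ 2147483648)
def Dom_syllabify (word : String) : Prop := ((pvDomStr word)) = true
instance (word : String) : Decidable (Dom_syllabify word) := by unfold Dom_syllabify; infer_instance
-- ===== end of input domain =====

-- B replaces A's index-jumping character loop (with lookahead) by a run-segmentation pass
-- followed by a run-by-run assembly; objective: alternative decomposition, same cost.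

-- ch.lower() in VOWELS  (PySem.Chars.lowerChar is Python's str.lower on the ASCII domain)
def isV (c : Char) : Bool := decide (PySem.Chars.lowerChar c ∈ "aeiouyAEIOUY".toList)

-- ===== PORT A =====
-- A's while loop: i always advances; the two split sub-branches (num_cons >= 2 / == 1) kept.
def loopA : List Char → List Char → List (List Char) → List (List Char) × List Char
  | [], cur, syl => (syl, cur)
  | ch :: rest, cur, syl =>
    if isV ch then
      -- consume consecutive vowels: rest.takeWhile isV; then count consonants ahead:
      -- C = (rest.dropWhile isV).takeWhile (!isV), the rest is R (vowel-initial if nonempty)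
      if 0 < ((rest.dropWhile isV).takeWhile (fun c => !isV c)).length ∧
          (rest.dropWhile isV).dropWhile (fun c => !isV c) ≠ [] then
        if 2 ≤ ((rest.dropWhile isV).takeWhile (fun c => !isV c)).length then
          -- add all but last consonant to current, last consonant restarts the loop
          loopA (((rest.dropWhile isV).takeWhile (fun c => !isV c)).getLast! ::
                   (rest.dropWhile isV).dropWhile (fun c => !isV c)) []
                (syl ++ [cur ++ [ch] ++ rest.takeWhile isV ++
                          ((rest.dropWhile isV).takeWhile (fun c => !isV c)).dropLast])
        else
          -- single consonant: it restarts the loop unchanged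
          loopA ((rest.dropWhile isV).takeWhile (fun c => !isV c) ++
                   (rest.dropWhile isV).dropWhile (fun c => !isV c)) []
                (syl ++ [cur ++ [ch] ++ rest.takeWhile isV])
      else
        loopA (rest.dropWhile isV) (cur ++ [ch] ++ rest.takeWhile isV) syl
    else
      loopA rest (cur ++ [ch]) syl
termination_by l => l.length
decreasing_by
  all_goals
    have h1 := (List.dropWhile_sublist (l := rest) (p := isV)).length_le
    have h2 := congrArg List.length
      (List.takeWhile_append_dropWhile (l := rest.dropWhile isV) (p := fun c => !isV c))
    rw [List.length_append] at h2
    simp only [List.length_cons, List.length_append]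
    omega

def finishA (syl : List (List Char)) (cur : List Char) : List (List Char) :=
  if cur.isEmpty then syl
  else if !syl.isEmpty && cur.length == 1 && !isV (cur.headD ' ') then
    syl.dropLast ++ [syl.getLast! ++ cur]
  else syl ++ [cur]

def syllabify (word : String) : List String :=
  let l := word.toList
  if l.length ≤ 2 then (if l.isEmpty then [] else [word])
  else
    let p := loopA l [] []
    let r := finishA p.1 p.2
    if r.isEmpty then [word] else r.map String.ofList

-- ===== PORT B =====
-- one scan into maximal same-class runs (Source B's inner while j = takeWhile of the same class)
def runsOf : List Char → List (Bool × List Char)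
  | [] => []
  | c :: cs =>
    let v := isV c
    (v, c :: cs.takeWhile (fun d => isV d == v)) :: runsOf (cs.dropWhile (fun d => isV d == v))
termination_by l => l.length
decreasing_by
  have := (List.dropWhile_sublist (l := cs) (p := fun d => isV d == isV c)).length_le
  simp; omega

-- run-by-run assembly; `first` = (k = 0), emptiness of `rest` = (k + 1 = len(runs))
def loopB : List (Bool × List Char) → Bool → List Char → List (List Char) → List (List Char) × List Char
  | [], _, cur, syl => (syl, cur)
  | (v, txt) :: rest, first, cur, syl =>
    if v then loopB rest false (cur ++ txt) syl
    else if !rest.isEmpty then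
      if first then loopB rest false txt syl
      else loopB rest false [txt.getLast!] (syl ++ [cur ++ txt.dropLast])
    else loopB rest false (cur ++ txt) syl

def finishB (syl : List (List Char)) (cur : List Char) : List (List Char) :=
  match cur with
  | [] => syl
  | [c] => if syl.isEmpty || isV c then syl ++ [[c]] else syl.dropLast ++ [syl.getLast! ++ [c]]
  | _ => syl ++ [cur]

def syllabify_alt (word : String) : List String :=
  let l := word.toList
  if l.length ≤ 2 then (if l.isEmpty then [] else [word])
  else
    let p := loopB (runsOf l) true [] []
    let r := finishB p.1 p.2
    if r.isEmpty then [word] else r.map String.ofList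

-- ===== PRECONDITION & SPEC =====
def Spec_syllabify (word : String) (out : List String) : Prop := out = syllabify_alt word
instance (word : String) (out : List String) : Decidable (Spec_syllabify word out) := by unfold Spec_syllabify; infer_instance

-- ===== CLAIM (what is proved, stated in full; the proofs are below) =====
def Claim_equal_syllabify : Prop := ∀ (word : String), Dom_syllabify word → Spec_syllabify word (syllabify word)

-- ===== LEMMAS AND PROOFS =====

-- small helpers about getLast! and dropWhile heads
theorem getLast!_mem_cons {α : Type} [Inhabited α] (d : α) (t : List α) :
    (d :: t).getLast! ∈ d :: t := by
  rw [List.getLast!_eq_getLast?_getD, List.getLast?_eq_some_getLast (l := d :: t) (by simp)]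
  simp [List.getLast_mem]

theorem dropWhile_head_false {α : Type} (p : α → Bool) :
    ∀ (l : List α) (d : α) (ds : List α), l.dropWhile p = d :: ds → p d = false := by
  intro l
  induction l with
  | nil => intro d ds h; simp at h
  | cons a as ih =>
    intro d ds h
    by_cases hp : p a = true
    · rw [List.dropWhile_cons_of_pos hp] at h; exact ih d ds h
    · rw [List.dropWhile_cons_of_neg hp] at h
      simp only [List.cons.injEq] at h
      rw [← h.1]; simpa using hp

-- runsOf is nonempty on a nonempty list
theorem runsOf_ne_nil (l : List Char) (h : l ≠ []) : runsOf l ≠ [] := by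
  match l with
  | [] => exact absurd rfl h
  | c :: cs => rw [runsOf]; simp

-- predicate bridges: (isV d == b) vs isV / !isV
theorem pred_true : (fun d => isV d == true) = isV := by funext d; simp
theorem pred_false : (fun d => isV d == false) = (fun d => !isV d) := by funext d; simp

theorem runsOf_vowel (ch : Char) (rest : List Char) (h : isV ch = true) :
    runsOf (ch :: rest) = (true, ch :: rest.takeWhile isV) :: runsOf (rest.dropWhile isV) := by
  rw [runsOf]; simp only [h, pred_true]

theorem runsOf_consonant (ch : Char) (rest : List Char) (h : isV ch = false) :
    runsOf (ch :: rest) =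
      (false, ch :: rest.takeWhile (fun d => !isV d)) :: runsOf (rest.dropWhile (fun d => !isV d)) := by
  rw [runsOf]; simp only [h, pred_false]

-- consonant characters are just accumulated into cur, one at a time
theorem loopA_cons_prefix (D : List Char) (hD : ∀ c ∈ D, isV c = false) :
    ∀ rest cur syl, loopA (D ++ rest) cur syl = loopA rest (cur ++ D) syl := by
  induction D with
  | nil => intro rest cur syl; simp
  | cons d D ih =>
    intro rest cur syl
    have hd : isV d = false := hD d (by simp)
    rw [List.cons_append, loopA, if_neg (by simp [hd])]
    rw [ih (fun c hc => hD c (by simp [hc])) rest (cur ++ [d]) syl]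
    simp

theorem finishA_eq_finishB (syl : List (List Char)) (cur : List Char) :
    finishA syl cur = finishB syl cur := by
  match cur with
  | [] => simp [finishA, finishB]
  | [c] =>
    simp only [finishA, finishB, List.isEmpty_cons, List.length_cons, List.length_nil]
    cases syl <;> cases h : isV c <;> simp [h]
  | c1 :: c2 :: cs =>
    simp [finishA, finishB]

-- the main alignment: from a vowel-initial remainder, A's loop equals B's loop on its runs
theorem loopA_eq_loopB_vowel :
    ∀ n (l : List Char), l.length ≤ n → (l ≠ [] → isV (l.headD 'a') = true) →
    ∀ cur syl, loopA l cur syl = loopB (runsOf l) false cur syl := by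
  intro n
  induction n with
  | zero =>
    intro l hl _ cur syl
    have hnil : l = [] := by cases l <;> simp_all
    subst hnil; simp [loopA, runsOf, loopB]
  | succ n ih =>
    intro l hl hv cur syl
    match l with
    | [] => simp [loopA, runsOf, loopB]
    | ch :: rest =>
      have hch : isV ch = true := by simpa using hv (by simp)
      have hlen : rest.length ≤ n := by simp at hl; omega
      rw [loopA, runsOf_vowel ch rest hch, loopB]
      rw [if_pos hch, if_pos rfl]
      cases hre : rest.dropWhile isV with
      | nil =>
        simp only [List.takeWhile_nil, List.dropWhile_nil]
        rw [if_neg (by simp)]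
        simp [loopA, runsOf, loopB]
      | cons d ds =>
        have hd : isV d = false := dropWhile_head_false isV rest d ds hre
        rw [List.takeWhile_cons_of_pos (by simp [hd]), List.dropWhile_cons_of_pos (by simp [hd])]
        rw [runsOf_consonant d ds hd]
        have hsplit : ds.takeWhile (fun c => !isV c) ++ ds.dropWhile (fun c => !isV c) = ds :=
          List.takeWhile_append_dropWhile
        have hCcons : ∀ c ∈ d :: ds.takeWhile (fun c => !isV c), isV c = false := by
          intro c hc
          rcases List.mem_cons.mp hc with h | h
          · rw [h]; exact hd
          · simpa using List.mem_takeWhile_imp h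
        have hlenR : (ds.dropWhile (fun c => !isV c)).length ≤ n := by
          have h1 := (List.dropWhile_sublist (l := rest) (p := isV)).length_le
          rw [hre] at h1
          have h2 := congrArg List.length hsplit
          simp only [List.length_append] at h2
          simp only [List.length_cons] at h1
          omega
        have hRhead : ds.dropWhile (fun c => !isV c) ≠ [] →
            isV ((ds.dropWhile (fun c => !isV c)).headD 'a') = true := by
          intro hne
          cases hR2 : ds.dropWhile (fun c => !isV c) with
          | nil => exact absurd hR2 hne
          | cons r rs =>
            have h3 := dropWhile_head_false (fun c => !isV c) ds r rs hR2
            simpa using h3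
        by_cases hRne : ds.dropWhile (fun c => !isV c) = []
        · -- everything after the vowels is consonants: no further split
          rw [if_neg (by simp [hRne])]
          have hds : ds.takeWhile (fun c => !isV c) = ds := by
            rw [hRne, List.append_nil] at hsplit; exact hsplit
          rw [hds, hRne]
          have hall : ∀ c ∈ d :: ds, isV c = false := by
            intro c hc; exact hCcons c (by rw [hds]; exact hc)
          have hA := loopA_cons_prefix (d :: ds) hall [] (cur ++ [ch] ++ rest.takeWhile isV) syl
          rw [List.append_nil] at hA
          rw [hA]
          simp [loopA, runsOf, loopB]
        · -- a vowel follows the consonant cluster: split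
          have hcond : 0 < (d :: ds.takeWhile (fun c => !isV c)).length ∧
              ds.dropWhile (fun c => !isV c) ≠ [] := ⟨by simp, hRne⟩
          rw [if_pos hcond]
          rw [loopB, if_neg (show ¬ (false = true) by simp)]
          have hbne : (!(runsOf (ds.dropWhile (fun c => !isV c))).isEmpty) = true := by
            simpa using runsOf_ne_nil _ hRne
          rw [if_pos hbne, if_neg (show ¬ (false = true) by simp)]
          have hglast : isV (d :: ds.takeWhile (fun c => !isV c)).getLast! = false :=
            hCcons _ (getLast!_mem_cons d _)
          by_cases h2 : 2 ≤ (d :: ds.takeWhile (fun c => !isV c)).length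
          · rw [if_pos h2]
            rw [show ((d :: ds.takeWhile (fun c => !isV c)).getLast! ::
                  ds.dropWhile (fun c => !isV c)) =
                [(d :: ds.takeWhile (fun c => !isV c)).getLast!] ++
                  ds.dropWhile (fun c => !isV c) from rfl]
            rw [loopA_cons_prefix [(d :: ds.takeWhile (fun c => !isV c)).getLast!]
                  (by intro c hc; simp at hc; rw [hc]; exact hglast)]
            rw [ih _ hlenR hRhead]
            simp
          · rw [if_neg h2]
            have h1 : ds.takeWhile (fun c => !isV c) = [] := by
              cases hq : ds.takeWhile (fun c => !isV c) with
              | nil => rfl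
              | cons x xs =>
                exfalso; apply h2; rw [hq]
                simp only [List.length_cons]; omega
            rw [h1]
            rw [show ([d] ++ ds.dropWhile (fun c => !isV c)) =
                  [d] ++ ds.dropWhile (fun c => !isV c) from rfl]
            rw [loopA_cons_prefix [d] (by intro c hc; simp at hc; rw [hc]; exact hd)]
            rw [ih _ hlenR hRhead]
            simp

-- top-level loop equality on the whole character list
theorem loopA_eq_loopB (l : List Char) : loopA l [] [] = loopB (runsOf l) true [] [] := by
  cases l with
  | nil => simp [loopA, runsOf, loopB]
  | cons ch rest =>
    by_cases hch : isV ch = true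
    · rw [loopA_eq_loopB_vowel (ch :: rest).length _ le_rfl (fun _ => by simpa using hch)]
      rw [runsOf_vowel ch rest hch, loopB, loopB, if_pos rfl, if_pos rfl]
    · have hch' : isV ch = false := by simpa using hch
      rw [loopA, if_neg (by simp [hch'])]
      rw [runsOf_consonant ch rest hch']
      have hsplit : rest.takeWhile (fun c => !isV c) ++ rest.dropWhile (fun c => !isV c) = rest :=
        List.takeWhile_append_dropWhile
      have htkcons : ∀ c ∈ rest.takeWhile (fun c => !isV c), isV c = false := by
        intro c hc; simpa using List.mem_takeWhile_imp hc
      have hstep : loopA rest ([] ++ [ch]) [] =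
          loopA (rest.dropWhile (fun c => !isV c))
            ([ch] ++ rest.takeWhile (fun c => !isV c)) [] := by
        conv_lhs => rw [← hsplit]
        rw [loopA_cons_prefix _ htkcons]
        simp
      rw [hstep]
      cases hre : rest.dropWhile (fun c => !isV c) with
      | nil =>
        simp [loopA, runsOf, loopB]
      | cons d ds =>
        have hdv : isV d = true := by
          simpa using dropWhile_head_false (fun c => !isV c) rest d ds hre
        rw [loopA_eq_loopB_vowel (d :: ds).length _ le_rfl (fun _ => by simpa using hdv)]
        rw [loopB, if_neg (by simp)]
        rw [if_pos (by simpa using runsOf_ne_nil (d :: ds) (by simp)), if_pos rfl]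
        simp

theorem syllabify_eq (word : String) : syllabify word = syllabify_alt word := by
  simp only [syllabify, syllabify_alt, loopA_eq_loopB, finishA_eq_finishB]

-- ===== VERDICT (by name: the statement is the Claim_ definition above) =====
theorem syllabify_spec : Claim_equal_syllabify := by
  intro word _
  unfold Spec_syllabify
  exact syllabify_eq word
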